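-- pv_equiv track=rewrite | github.com/sweep7125/rulesets | .ci/domainset_ops.py | optimize_suffix_full
-- ===== SOURCE A (Python) =====
-- from typing import List, Tuple, Set, Dict, Iterable
--
-- class _TrieNode:
--     def __init__(self):
--         self.children: Dict[str, "_TrieNode"] = {}
--         self.suffix: bool = False
--         self.full: bool = False
--
-- def _labels_rev(base: str) -> List[str]:
--     return base.split(".")[::-1] if base else []
--
-- def _trie_insert(root: _TrieNode, base: str, flag: str) -> None:
--     node = root
--     for lab in _labels_rev(base):
--         node = node.children.setdefault(lab, _TrieNode())
--     if flag == "suffix":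
--         node.suffix = True
--     elif flag == "full":
--         node.full = True
--
-- def _prune(node: _TrieNode, has_suffix_above: bool = False) -> None:
--     if has_suffix_above:
--         node.suffix = False
--         node.full = False
--         for ch in node.children.values():
--             _prune(ch, True)
--         return
--     if node.suffix and node.full:
--         node.full = False
--     next_has_suffix = has_suffix_above or node.suffix
--     for ch in node.children.values():
--         _prune(ch, next_has_suffix)
--
-- def _trie_collect(node: _TrieNode, path_rev: List[str], out_suffix: Set[str], out_full: Set[str]) -> None:
--     base = ".".join(path_rev[::-1]) if path_rev else ""
--     if node.suffix and base:
--         out_suffix.add(base)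
--     if node.full and base:
--         out_full.add(base)
--     for lab, ch in node.children.items():
--         _trie_collect(ch, path_rev + [lab], out_suffix, out_full)
--
-- def optimize_suffix_full(entries: Iterable[Tuple[str, str]]) -> Tuple[Set[str], Set[str]]:
--     root = _TrieNode()
--     for t, b in entries:
--         if b:
--             _trie_insert(root, b, t)
--     _prune(root, False)
--     S: Set[str] = set()
--     E: Set[str] = set()
--     _trie_collect(root, [], S, E)
--     return S, E
-- ===== SOURCE B (Python) =====
-- def optimize_suffix_full(entries):
--     """Single pure recursive pass over grouped reversed-label lists; no trie
--     nodes, no separate prune/collect phases."""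
--     items = [(b.split(".")[::-1], t) for t, b in entries if b]
--     S = set()
--     E = set()
--
--     def walk(group, path_rev, above):
--         here_suffix = any(labs == [] and t == "suffix" for labs, t in group)
--         here_full = any(labs == [] and t == "full" for labs, t in group)
--         base = ".".join(path_rev[::-1])
--         if not above and base:
--             if here_suffix:
--                 S.add(base)
--             if here_full and not here_suffix:
--                 E.add(base)
--         below = above or here_suffix
--         heads = []
--         for labs, _ in group:
--             if labs and labs[0] not in heads:
--                 heads.append(labs[0])
--         children = [(lab, [(labs[1:], t) for labs, t in group if labs and labs[0] == lab])
--                     for lab in heads]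
--         for lab, sub in children:
--             walk(sub, path_rev + [lab], below)
--
--     walk(items, [], False)
--     return S, E
-- ===== Notes on version B (the rewrite author's own statement) =====
-- stated objective: alternative
-- what changed: Replaces the three-phase mutable label trie (insert every base, then a prune pass, then a collect pass over allocated nodes) by one pure recursive pass that groups the reversed label lists by their head label, fusing pruning and collection into the walk with no node structure at all.
import Mathlib
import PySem

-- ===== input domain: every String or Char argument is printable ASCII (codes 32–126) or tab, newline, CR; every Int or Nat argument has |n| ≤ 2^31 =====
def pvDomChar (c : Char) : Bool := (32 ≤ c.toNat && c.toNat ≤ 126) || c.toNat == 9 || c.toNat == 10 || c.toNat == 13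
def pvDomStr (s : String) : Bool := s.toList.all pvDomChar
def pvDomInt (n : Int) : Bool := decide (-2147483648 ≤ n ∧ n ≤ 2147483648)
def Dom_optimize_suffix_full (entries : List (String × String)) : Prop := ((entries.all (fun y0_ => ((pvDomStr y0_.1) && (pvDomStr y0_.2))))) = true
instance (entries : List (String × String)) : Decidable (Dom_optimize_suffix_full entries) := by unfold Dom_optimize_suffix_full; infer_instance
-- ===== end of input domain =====

-- B replaces the three-phase mutable label trie (insert, prune, collect) by one pure
-- recursive pass over reversed label lists grouped by head label (objective: alternative).


-- ===== PORT A =====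
-- children dicts rendered as a mutual pair (no nested inductive); a child dict is
-- an insertion-ordered assoc structure, exactly Python's dict of a _TrieNode.
mutual
inductive TrieNode : Type where
  | mk : Bool → Bool → TrieChildren → TrieNode
inductive TrieChildren : Type where
  | nil : TrieChildren
  | cons : String → TrieNode → TrieChildren → TrieChildren
end

def emptyNode : TrieNode := .mk false false .nil

def childGet : TrieChildren → String → Option TrieNode
  | .nil, _ => none
  | .cons k n rest, lab => if k == lab then some n else childGet rest lab

-- dict assignment: overwrite in place, append a fresh key at the end (setdefault order)
def childSet : TrieChildren → String → TrieNode → TrieChildren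
  | .nil, lab, v => .cons lab v .nil
  | .cons k n rest, lab, v => if k == lab then .cons k v rest else .cons k n (childSet rest lab v)

def labelsRev (b : String) : List String :=
  if b ≠ "" then ((PySem.Str.split? b ".").getD []).reverse else []

-- _trie_insert: the in-place walk-and-mutate becomes a functional path update
def insertLabs : List String → String → TrieNode → TrieNode
  | [], flag, .mk s f c =>
      if flag == "suffix" then .mk true f c
      else if flag == "full" then .mk s true c
      else .mk s f c
  | lab :: rest, flag, .mk s f c =>
      .mk s f (childSet c lab (insertLabs rest flag ((childGet c lab).getD emptyNode)))

def trieInsert (root : TrieNode) (base flag : String) : TrieNode :=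
  insertLabs (labelsRev base) flag root

mutual
def prune : TrieNode → Bool → TrieNode
  | .mk s f c, above =>
      if above then .mk false false (pruneChildren c true)
      else .mk s (if s && f then false else f) (pruneChildren c (above || s))
def pruneChildren : TrieChildren → Bool → TrieChildren
  | .nil, _ => .nil
  | .cons k n rest, b => .cons k (prune n b) (pruneChildren rest b)
end

mutual
def collect : TrieNode → List String → List String × List String → List String × List String
  | .mk s f c, pathRev, acc =>
      let base := if pathRev ≠ [] then PySem.Str.join "." pathRev.reverse else ""
      let acc1 := if s && !(base == "") then (PySem.Set.add acc.1 base, acc.2) else acc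
      let acc2 := if f && !(base == "") then (acc1.1, PySem.Set.add acc1.2 base) else acc1
      collectChildren c pathRev acc2
def collectChildren : TrieChildren → List String → List String × List String → List String × List String
  | .nil, _, acc => acc
  | .cons lab n rest, pathRev, acc => collectChildren rest pathRev (collect n (pathRev ++ [lab]) acc)
end

def optimize_suffix_full (entries : List (String × String)) : List String × List String :=
  let root := entries.foldl (fun r p => if p.2 ≠ "" then trieInsert r p.2 p.1 else r) emptyNode
  collect (prune root false) [] ((PySem.Set.empty : PySem.Set String), (PySem.Set.empty : PySem.Set String))

-- ===== PORT B =====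
def sumLen (g : List (List String × String)) : Nat := (g.map (fun p => p.1.length)).sum

-- first occurrences of the head labels, in order (the Python 'heads' loop is a set-as-list)
def headsOf (g : List (List String × String)) : List String :=
  PySem.Set.ofList (g.filterMap (fun p => p.1.head?))

def subgroupOf (g : List (List String × String)) (lab : String) : List (List String × String) :=
  g.filterMap (fun p =>
    match p.1 with
    | [] => none
    | h :: t => if h == lab then some (t, p.2) else none)

def childMeasure (l : List (String × List (List String × String))) : Nat :=
  (l.map (fun q => 2 * sumLen q.2 + 2)).sum

-- termination lemmas for the walk (cited in decreasing_by)
theorem sumLen_cons (p : List String × String) (g : List (List String × String)) :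
    sumLen (p :: g) = p.1.length + sumLen g := by simp [sumLen]

theorem subgroupOf_cons_nil (f : String) (g : List (List String × String)) (lab : String) :
    subgroupOf (([], f) :: g) lab = subgroupOf g lab := rfl

theorem subgroupOf_cons_cons (h : String) (t : List String) (f : String)
    (g : List (List String × String)) (lab : String) :
    subgroupOf ((h :: t, f) :: g) lab =
      (if h = lab then [(t, f)] else []) ++ subgroupOf g lab := by
  by_cases hh : h = lab <;> simp [subgroupOf, hh]

theorem sumLen_subgroup_le (g : List (List String × String)) (lab : String) :
    sumLen (subgroupOf g lab) ≤ sumLen (g.filter (fun p => decide (p.1.head? = some lab))) := by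
  induction g with
  | nil => simp [subgroupOf, sumLen]
  | cons p g ih =>
    obtain ⟨labs, flag⟩ := p
    cases labs with
    | nil => simpa [subgroupOf_cons_nil, List.filter_cons] using ih
    | cons h t =>
      by_cases hh : h = lab <;>
        simp [subgroupOf_cons_cons, hh, sumLen_cons] <;> omega

theorem sumLen_subgroup_bound (g : List (List String × String)) (lab : String)
    (hw : ∃ p ∈ g, p.1.head? = some lab) :
    2 * sumLen (subgroupOf g lab) + 2 ≤
      2 * sumLen (g.filter (fun p => decide (p.1.head? = some lab))) := by
  induction g with
  | nil => simp at hw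
  | cons p g ih =>
    obtain ⟨labs, flag⟩ := p
    cases labs with
    | nil =>
      obtain ⟨q, hq, hqh⟩ := hw
      rcases List.mem_cons.1 hq with h | h
      · subst h; simp at hqh
      · simpa [subgroupOf_cons_nil, List.filter_cons] using ih ⟨q, h, hqh⟩
    | cons h t =>
      by_cases hh : h = lab
      · have hle := sumLen_subgroup_le g lab
        simp [subgroupOf_cons_cons, hh, sumLen_cons]
        omega
      · obtain ⟨q, hq, hqh⟩ := hw
        rcases List.mem_cons.1 hq with h' | h'
        · subst h'; simp at hqh; exact absurd hqh hh
        · have := ih ⟨q, h', hqh⟩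
          simp [subgroupOf_cons_cons, hh] at this ⊢
          omega

theorem sumLen_filter_partition (g : List (List String × String)) (P : List String × String → Bool) :
    sumLen (g.filter P) + sumLen (g.filter (fun p => !(P p))) = sumLen g := by
  induction g with
  | nil => simp [sumLen]
  | cons p g ih =>
    by_cases hp : P p = true <;>
      simp [hp, sumLen_cons] <;> omega

theorem subgroupOf_filter_ne (g : List (List String × String)) (lab lab' : String)
    (hne : lab' ≠ lab) :
    subgroupOf (g.filter (fun p => !(decide (p.1.head? = some lab)))) lab' = subgroupOf g lab' := by
  induction g with
  | nil => rfl
  | cons p g ih =>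
    obtain ⟨labs, flag⟩ := p
    cases labs with
    | nil => simpa [subgroupOf_cons_nil, List.filter_cons] using ih
    | cons h t =>
      by_cases hh : h = lab
      · subst hh
        rw [List.filter_cons_of_neg (by simp), ih, subgroupOf_cons_cons,
          if_neg (fun hx => hne hx.symm), List.nil_append]
      · rw [List.filter_cons_of_pos (by simp [hh]), subgroupOf_cons_cons,
          subgroupOf_cons_cons, ih]

theorem mem_headsOf (g : List (List String × String)) (lab : String) :
    lab ∈ headsOf g ↔ ∃ p ∈ g, p.1.head? = some lab := by
  simp [headsOf, PySem.Set.mem_ofList, List.mem_filterMap]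

theorem childMeasure_cons (q : String × List (List String × String))
    (l : List (String × List (List String × String))) :
    childMeasure (q :: l) = 2 * sumLen q.2 + 2 + childMeasure l := by
  simp [childMeasure]

theorem childMeasure_aux (L : List String) :
    ∀ g : List (List String × String), L.Nodup →
      (∀ lab ∈ L, ∃ p ∈ g, p.1.head? = some lab) →
      childMeasure (L.map (fun lab => (lab, subgroupOf g lab))) ≤ 2 * sumLen g := by
  induction L with
  | nil => intro g _ _; simp [childMeasure]
  | cons lab L ih =>
    intro g hnd hwit
    have hmem : ∃ p ∈ g, p.1.head? = some lab := hwit lab (by simp)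
    have hbound := sumLen_subgroup_bound g lab hmem
    have hpart := sumLen_filter_partition g (fun p => decide (p.1.head? = some lab))
    have hclean : L.map (fun lab' => (lab', subgroupOf g lab')) =
        L.map (fun lab' => (lab',
          subgroupOf (g.filter (fun p => !(decide (p.1.head? = some lab)))) lab')) := by
      apply List.map_congr_left
      intro lab' hl
      have hne : lab' ≠ lab := fun h => (List.nodup_cons.1 hnd).1 (h ▸ hl)
      rw [subgroupOf_filter_ne g lab lab' hne]
    have hrec := ih (g.filter (fun p => !(decide (p.1.head? = some lab)))) (List.nodup_cons.1 hnd).2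
      (by
        intro lab' hl
        obtain ⟨p, hp, hph⟩ := hwit lab' (by simp [hl])
        have hne : lab' ≠ lab := fun h => (List.nodup_cons.1 hnd).1 (h ▸ hl)
        exact ⟨p, List.mem_filter.2 ⟨hp, by simp [hph, fun hx : lab' = lab => hne hx]⟩, hph⟩)
    rw [← hclean] at hrec
    rw [List.map_cons, childMeasure_cons]
    dsimp only
    omega

theorem childMeasure_heads_le (g : List (List String × String)) :
    childMeasure ((headsOf g).map (fun lab => (lab, subgroupOf g lab))) ≤ 2 * sumLen g := by
  refine childMeasure_aux (headsOf g) g (PySem.Set.nodup_ofList _) ?_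
  intro lab hl; exact (mem_headsOf g lab).1 hl

mutual
def walk (g : List (List String × String)) (pathRev : List String) (above : Bool)
    (acc : List String × List String) : List String × List String :=
  let hereS := g.any (fun p => p.1 == [] && p.2 == "suffix")
  let hereF := g.any (fun p => p.1 == [] && p.2 == "full")
  let base := PySem.Str.join "." pathRev.reverse
  let acc1 :=
    if !above && !(base == "") then
      (if hereS then PySem.Set.add acc.1 base else acc.1,
       if hereF && !hereS then PySem.Set.add acc.2 base else acc.2)
    else acc
  walkChildren ((headsOf g).map (fun lab => (lab, subgroupOf g lab))) pathRev (above || hereS) acc1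
termination_by 2 * sumLen g + 1
decreasing_by exact Nat.lt_succ_of_le (childMeasure_heads_le g)

def walkChildren : List (String × List (List String × String)) → List String → Bool →
    List String × List String → List String × List String
  | [], _, _, acc => acc
  | (lab, sub) :: rest, pathRev, below, acc =>
      walkChildren rest pathRev below (walk sub (pathRev ++ [lab]) below acc)
termination_by l _ _ _ => childMeasure l
decreasing_by
  · rw [childMeasure_cons]; dsimp only; omega
  · rw [childMeasure_cons]; dsimp only; omega
end

def optimize_suffix_full_alt (entries : List (String × String)) : List String × List String :=
  let items := entries.filterMap (fun p =>
    if p.2 ≠ "" then some (((PySem.Str.split? p.2 ".").getD []).reverse, p.1) else none)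
  walk items [] false ((PySem.Set.empty : PySem.Set String), (PySem.Set.empty : PySem.Set String))

-- ===== PRECONDITION & SPEC =====
def Spec_optimize_suffix_full (entries : List (String × String)) (out : List String × List String) : Prop := out = optimize_suffix_full_alt entries
instance (entries : List (String × String)) (out : List String × List String) : Decidable (Spec_optimize_suffix_full entries out) := by unfold Spec_optimize_suffix_full; infer_instance

-- ===== CLAIM (what is proved, stated in full; the proofs are below) =====
def Claim_equal_optimize_suffix_full : Prop := ∀ (entries : List (String × String)), Dom_optimize_suffix_full entries → Spec_optimize_suffix_full entries (optimize_suffix_full entries)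

-- ===== LEMMAS AND PROOFS =====
theorem sumLen_filter_le (g : List (List String × String)) (P : List String × String → Bool) :
    sumLen (g.filter P) ≤ sumLen g := by
  induction g with
  | nil => simp [sumLen]
  | cons p g ih =>
    by_cases hp : P p = true <;>
      simp [hp, sumLen_cons] <;> omega

theorem sumLen_subgroup_lt (g : List (List String × String)) (lab : String)
    (h : lab ∈ headsOf g) : sumLen (subgroupOf g lab) < sumLen g := by
  have hw := (mem_headsOf g lab).1 h
  have h1 := sumLen_subgroup_bound g lab hw
  have h2 := sumLen_filter_le g (fun p => decide (p.1.head? = some lab))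
  omega

def hasSuf (g : List (List String × String)) : Bool := g.any (fun p => p.1 == [] && p.2 == "suffix")
def hasFul (g : List (List String × String)) : Bool := g.any (fun p => p.1 == [] && p.2 == "full")

def buildTrie (g : List (List String × String)) : TrieNode :=
  g.foldl (fun r q => insertLabs q.1 q.2 r) emptyNode

def ofAssoc : List (String × TrieNode) → TrieChildren
  | [] => .nil
  | (k, n) :: rest => .cons k n (ofAssoc rest)

theorem buildTrie_snoc (g : List (List String × String)) (q : List String × String) :
    buildTrie (g ++ [q]) = insertLabs q.1 q.2 (buildTrie g) := by
  simp [buildTrie, List.foldl_append]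

theorem hasSuf_snoc (g : List (List String × String)) (q : List String × String) :
    hasSuf (g ++ [q]) = (hasSuf g || (q.1 == [] && q.2 == "suffix")) := by
  simp [hasSuf]

theorem hasFul_snoc (g : List (List String × String)) (q : List String × String) :
    hasFul (g ++ [q]) = (hasFul g || (q.1 == [] && q.2 == "full")) := by
  simp [hasFul]

theorem headsOf_snoc_nil (g : List (List String × String)) (f : String) :
    headsOf (g ++ [([], f)]) = headsOf g := by
  simp [headsOf, List.filterMap_append]

theorem subgroupOf_snoc_nil (g : List (List String × String)) (f lab : String) :
    subgroupOf (g ++ [([], f)]) lab = subgroupOf g lab := by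
  simp [subgroupOf, List.filterMap_append]

theorem headsOf_snoc_cons (g : List (List String × String)) (h : String) (t : List String) (f : String) :
    headsOf (g ++ [(h :: t, f)]) = PySem.Set.add (headsOf g) h := by
  simp only [headsOf, List.filterMap_append]
  rw [show (List.filterMap (fun p => p.1.head?) [(h :: t, f)]) = [h] from rfl]
  exact PySem.Set.ofList_append_singleton _ _

theorem subgroupOf_snoc_cons (g : List (List String × String)) (h : String) (t : List String)
    (f lab : String) :
    subgroupOf (g ++ [(h :: t, f)]) lab = subgroupOf g lab ++ (if h = lab then [(t, f)] else []) := by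
  by_cases hh : h = lab <;> simp [subgroupOf, List.filterMap_append, hh]

theorem childGet_ofAssoc (ks : List String) (F : String → TrieNode) (lab : String)
    (hnd : ks.Nodup) :
    childGet (ofAssoc (ks.map (fun k => (k, F k)))) lab
      = if lab ∈ ks then some (F lab) else none := by
  induction ks with
  | nil => simp [ofAssoc, childGet]
  | cons k ks ih =>
    by_cases hk : k = lab
    · subst hk; simp [ofAssoc, childGet]
    · rw [List.map_cons]
      show (if (k == lab) = true then some (F k) else childGet (ofAssoc (ks.map fun k => (k, F k))) lab) = _
      rw [if_neg (by simp [hk]), ih (List.nodup_cons.1 hnd).2]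
      have hlk : ¬ lab = k := fun h => hk h.symm
      simp [hlk]

theorem childSet_ofAssoc_mem (ks : List String) (F : String → TrieNode) (lab : String)
    (v : TrieNode) (hnd : ks.Nodup) (hm : lab ∈ ks) :
    childSet (ofAssoc (ks.map (fun k => (k, F k)))) lab v
      = ofAssoc (ks.map (fun k => (k, if k = lab then v else F k))) := by
  induction ks with
  | nil => simp at hm
  | cons k ks ih =>
    rw [List.map_cons, List.map_cons]
    show (if (k == lab) = true then TrieChildren.cons k v (ofAssoc (ks.map fun k => (k, F k)))
        else TrieChildren.cons k (F k) (childSet (ofAssoc (ks.map fun k => (k, F k))) lab v)) = _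
    by_cases hk : k = lab
    · subst hk
      rw [if_pos (by simp)]
      have : ks.map (fun k' => (k', if k' = k then v else F k')) = ks.map (fun k' => (k', F k')) := by
        apply List.map_congr_left
        intro k' hk'
        have : k' ≠ k := fun h => (List.nodup_cons.1 hnd).1 (h ▸ hk')
        simp [this]
      simp [ofAssoc, this]
    · rw [if_neg (by simp [hk])]
      have hm' : lab ∈ ks := by
        rcases List.mem_cons.1 hm with h | h
        · exact absurd h.symm hk
        · exact h
      rw [ih (List.nodup_cons.1 hnd).2 hm']
      simp [ofAssoc, hk]

theorem childSet_ofAssoc_not_mem (ks : List String) (F : String → TrieNode) (lab : String)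
    (v : TrieNode) (hm : lab ∉ ks) :
    childSet (ofAssoc (ks.map (fun k => (k, F k)))) lab v
      = ofAssoc ((ks.map (fun k => (k, F k))) ++ [(lab, v)]) := by
  induction ks with
  | nil => rfl
  | cons k ks ih =>
    have hk : k ≠ lab := fun h => hm (by simp [h])
    rw [List.map_cons]
    show (if (k == lab) = true then TrieChildren.cons k v (ofAssoc (ks.map fun k => (k, F k)))
        else TrieChildren.cons k (F k) (childSet (ofAssoc (ks.map fun k => (k, F k))) lab v)) = _
    rw [if_neg (by simp [hk]), ih (fun h => hm (by simp [h]))]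
    simp [ofAssoc]

theorem subgroupOf_eq_nil_of_no_head (lab : String) :
    ∀ g : List (List String × String), (∀ p ∈ g, p.1.head? ≠ some lab) → subgroupOf g lab = [] := by
  intro g
  induction g with
  | nil => intro _; rfl
  | cons p g ih =>
    intro hno
    obtain ⟨labs, flag⟩ := p
    cases labs with
    | nil =>
      rw [subgroupOf_cons_nil]
      exact ih (fun q hq => hno q (by simp [hq]))
    | cons h0 t =>
      have hne : h0 ≠ lab := by
        intro he
        exact hno (h0 :: t, flag) (by simp) (by simp [he])
      rw [subgroupOf_cons_cons, if_neg hne, List.nil_append]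
      exact ih (fun q hq => hno q (by simp [hq]))

theorem subgroupOf_eq_nil_of_not_mem_heads (g : List (List String × String)) (lab : String)
    (h : lab ∉ headsOf g) : subgroupOf g lab = [] :=
  subgroupOf_eq_nil_of_no_head lab g
    (fun p hp hph => h ((mem_headsOf g lab).2 ⟨p, hp, hph⟩))

theorem buildTrie_char (g : List (List String × String)) :
    buildTrie g = .mk (hasSuf g) (hasFul g)
      (ofAssoc ((headsOf g).map (fun lab => (lab, buildTrie (subgroupOf g lab))))) := by
  induction g using List.reverseRecOn with
  | nil => rfl
  | append_singleton g q ih =>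
    obtain ⟨labs, flag⟩ := q
    rw [buildTrie_snoc, ih]
    cases labs with
    | nil =>
      have hheads := headsOf_snoc_nil g flag
      have hsub : ∀ lab, subgroupOf (g ++ [([], flag)]) lab = subgroupOf g lab :=
        subgroupOf_snoc_nil g flag
      by_cases hsf : flag = "suffix"
      · subst hsf; simp [insertLabs, hasSuf_snoc, hasFul_snoc, hheads, hsub]
      · by_cases hff : flag = "full"
        · subst hff
          simp [insertLabs, hasSuf_snoc, hasFul_snoc, hheads, hsub,
            show ("full" == "suffix") = false from by decide]
        · simp [insertLabs, hasSuf_snoc, hasFul_snoc, hheads, hsub,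
            show (flag == "suffix") = false from by simp [hsf],
            show (flag == "full") = false from by simp [hff]]
    | cons h t =>
      have hnd : (headsOf g).Nodup := PySem.Set.nodup_ofList _
      simp only [insertLabs]
      rw [childGet_ofAssoc _ _ _ hnd]
      by_cases hmem : h ∈ headsOf g
      · rw [if_pos hmem, Option.getD_some, childSet_ofAssoc_mem _ _ _ _ hnd hmem]
        have hheads : headsOf (g ++ [(h :: t, flag)]) = headsOf g := by
          rw [headsOf_snoc_cons, PySem.Set.add_of_mem hmem]
        rw [hasSuf_snoc, hasFul_snoc, hheads]
        simp only [show ((h :: t : List String) == []) = false from by simp, Bool.false_and,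
          Bool.or_false]
        congr 1
        apply congrArg
        apply List.map_congr_left
        intro k hk
        by_cases hkh : k = h
        · subst hkh
          simp [subgroupOf_snoc_cons, buildTrie_snoc]
        · have hne : ¬ h = k := fun he => hkh he.symm
          simp [subgroupOf_snoc_cons, hne, hkh]
      · rw [if_neg hmem, Option.getD_none, childSet_ofAssoc_not_mem _ _ _ _ hmem]
        have hheads : headsOf (g ++ [(h :: t, flag)]) = headsOf g ++ [h] := by
          rw [headsOf_snoc_cons, PySem.Set.add_of_not_mem hmem]
        rw [hasSuf_snoc, hasFul_snoc, hheads]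
        simp only [show ((h :: t : List String) == []) = false from by simp, Bool.false_and,
          Bool.or_false]
        have h1 : List.map (fun lab => (lab, buildTrie (subgroupOf (g ++ [(h :: t, flag)]) lab))) (headsOf g)
            = List.map (fun k => (k, buildTrie (subgroupOf g k))) (headsOf g) := by
          apply List.map_congr_left
          intro k hk
          have hkh : ¬ h = k := fun he => hmem (he ▸ hk)
          rw [subgroupOf_snoc_cons, if_neg hkh, List.append_nil]
        have h2 : buildTrie (subgroupOf (g ++ [(h :: t, flag)]) h) = insertLabs t flag emptyNode := by
          rw [subgroupOf_snoc_cons, if_pos rfl,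
            subgroupOf_eq_nil_of_not_mem_heads g h hmem, List.nil_append]
          rfl
        rw [List.map_append, List.map_singleton, h1, h2]

theorem pruneChildren_ofAssoc (l : List (String × TrieNode)) (b : Bool) :
    pruneChildren (ofAssoc l) b = ofAssoc (l.map (fun q => (q.1, prune q.2 b))) := by
  induction l with
  | nil => rfl
  | cons q l ih => obtain ⟨k, n⟩ := q; simp [ofAssoc, pruneChildren, ih]

theorem collectChildren_ofAssoc (l : List (String × TrieNode)) (pathRev : List String) :
    ∀ acc, collectChildren (ofAssoc l) pathRev acc
      = l.foldl (fun acc q => collect q.2 (pathRev ++ [q.1]) acc) acc := by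
  induction l with
  | nil => intro acc; rfl
  | cons q l ih => obtain ⟨k, n⟩ := q; intro acc; simp [ofAssoc, collectChildren, ih]

theorem walkChildren_eq_foldl (l : List (String × List (List String × String)))
    (pathRev : List String) (below : Bool) :
    ∀ acc, walkChildren l pathRev below acc
      = l.foldl (fun acc q => walk q.2 (pathRev ++ [q.1]) below acc) acc := by
  induction l with
  | nil => intro acc; rw [walkChildren]; rfl
  | cons q l ih => obtain ⟨k, sub⟩ := q; intro acc; rw [walkChildren]; simp [ih]

theorem prune_mk (s f : Bool) (c : TrieChildren) (above : Bool) :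
    prune (.mk s f c) above =
      if above then .mk false false (pruneChildren c true)
      else .mk s (if s && f then false else f) (pruneChildren c (above || s)) := rfl

theorem collect_mk (s f : Bool) (c : TrieChildren) (pathRev : List String)
    (acc : List String × List String) :
    collect (.mk s f c) pathRev acc =
      collectChildren c pathRev
        (let base := if pathRev ≠ [] then PySem.Str.join "." pathRev.reverse else ""
         let acc1 := if s && !(base == "") then (PySem.Set.add acc.1 base, acc.2) else acc
         if f && !(base == "") then (acc1.1, PySem.Set.add acc1.2 base) else acc1) := rfl

theorem walk_eq (g : List (List String × String)) (pathRev : List String) (above : Bool)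
    (acc : List String × List String) :
    walk g pathRev above acc =
      walkChildren ((headsOf g).map (fun lab => (lab, subgroupOf g lab))) pathRev
        (above || hasSuf g)
        (if !above && !(PySem.Str.join "." pathRev.reverse == "") then
          (if hasSuf g then PySem.Set.add acc.1 (PySem.Str.join "." pathRev.reverse) else acc.1,
           if hasFul g && !hasSuf g then PySem.Set.add acc.2 (PySem.Str.join "." pathRev.reverse) else acc.2)
         else acc) := by
  rw [walk]
  rfl

theorem main_step (g : List (List String × String)) (pathRev : List String) (above : Bool)
    (acc : List String × List String)
    (hrec : ∀ lab ∈ headsOf g, ∀ (b : Bool) (acc' : List String × List String),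
        collect (prune (buildTrie (subgroupOf g lab)) b) (pathRev ++ [lab]) acc'
          = walk (subgroupOf g lab) (pathRev ++ [lab]) b acc') :
    collect (prune (buildTrie g) above) pathRev acc = walk g pathRev above acc := by
  have hbase : (if pathRev ≠ [] then PySem.Str.join "." pathRev.reverse else "")
      = PySem.Str.join "." pathRev.reverse := by
    cases pathRev with
    | nil => simp; rfl
    | cons x xs => rw [if_pos (by simp)]
  have hchild : ∀ (b : Bool) (acc₀ : List String × List String),
      collectChildren (pruneChildren
          (ofAssoc ((headsOf g).map (fun lab => (lab, buildTrie (subgroupOf g lab))))) b)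
        pathRev acc₀
        = walkChildren ((headsOf g).map (fun lab => (lab, subgroupOf g lab))) pathRev b acc₀ := by
    intro b acc₀
    rw [pruneChildren_ofAssoc, collectChildren_ofAssoc, walkChildren_eq_foldl]
    simp only [List.foldl_map]
    exact PySem.List.foldl_congr_mem _ _ _ _ (fun acc' lab hlab => hrec lab hlab b acc')
  rw [buildTrie_char g, walk_eq, prune_mk]
  cases above with
  | true =>
    rw [if_pos rfl, collect_mk, show (true || hasSuf g) = true from Bool.true_or _, hchild true]
    congr 1
  | false =>
    rw [if_neg (by simp), collect_mk,
      show (false || hasSuf g) = hasSuf g from Bool.false_or _, hchild (hasSuf g)]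
    congr 1
    rw [hbase]
    cases hS : hasSuf g <;> cases hF : hasFul g <;>
      by_cases hb : (PySem.Str.join "." pathRev.reverse == "") = true <;>
        simp [hb]

theorem collect_prune_eq_walk (n : Nat) :
    ∀ g : List (List String × String), sumLen g ≤ n →
      ∀ (pathRev : List String) (above : Bool) (acc : List String × List String),
        collect (prune (buildTrie g) above) pathRev acc = walk g pathRev above acc := by
  induction n with
  | zero =>
    intro g hg pathRev above acc
    apply main_step
    intro lab hlab b acc'
    have := sumLen_subgroup_lt g lab hlab
    omega
  | succ n ih =>
    intro g hg pathRev above acc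
    apply main_step
    intro lab hlab b acc'
    exact ih (subgroupOf g lab) (by have := sumLen_subgroup_lt g lab hlab; omega) _ b acc'

theorem ports_eq (entries : List (String × String)) :
    optimize_suffix_full entries = optimize_suffix_full_alt entries := by
  show collect (prune (entries.foldl
      (fun r p => if p.2 ≠ "" then trieInsert r p.2 p.1 else r) emptyNode) false) []
      ((PySem.Set.empty : PySem.Set String), (PySem.Set.empty : PySem.Set String))
    = walk (entries.filterMap (fun p =>
        if p.2 ≠ "" then some (((PySem.Str.split? p.2 ".").getD []).reverse, p.1) else none))
        [] false ((PySem.Set.empty : PySem.Set String), (PySem.Set.empty : PySem.Set String))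
  have hfold : ∀ t : TrieNode,
      entries.foldl (fun r p => if p.2 ≠ "" then trieInsert r p.2 p.1 else r) t
        = (entries.filterMap (fun p =>
            if p.2 ≠ "" then some (((PySem.Str.split? p.2 ".").getD []).reverse, p.1) else none)
          ).foldl (fun r q => insertLabs q.1 q.2 r) t := by
    induction entries with
    | nil => intro t; rfl
    | cons p es ih =>
      intro t
      by_cases hp : p.2 = ""
      · simp only [List.foldl_cons, List.filterMap_cons, hp]
        rw [if_neg (by simp), if_neg (by simp)]
        exact ih t
      · simp only [List.foldl_cons, List.filterMap_cons]
        rw [if_pos (by simpa using hp), if_pos (by simpa using hp), List.foldl_cons]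
        rw [show trieInsert t p.2 p.1
            = insertLabs (((PySem.Str.split? p.2 ".").getD []).reverse) p.1 t from by
          rw [trieInsert, labelsRev, if_pos (by simpa using hp)]]
        exact ih _
  rw [hfold]
  exact collect_prune_eq_walk (sumLen _) _ le_rfl [] false _

-- ===== VERDICT (by name: the statement is the Claim_ definition above) =====
theorem optimize_suffix_full_spec : Claim_equal_optimize_suffix_full := by
  intro entries _
  show optimize_suffix_full entries = optimize_suffix_full_alt entries
  exact ports_eq entries
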